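-- pv_equiv track=rewrite | github.com/mfurga-cs/asd | egzamin3/zad2.py | double_prefix
-- ===== SOURCE A (Python) =====
-- class Node:
--   def __init__(self):
--     self.count = 0
--     self.lchild = None
--     self.rchild = None
--
-- def tree_left(tree):
--   if tree.lchild is None:
--     tree.lchild = Node()
--   return tree.lchild
--
-- def tree_right(tree):
--   if tree.rchild is None:
--     tree.rchild = Node()
--   return tree.rchild
--
-- def tree_search(tree, pref=''):
--   result = []
--   ok = True
--   if tree.lchild is not None and tree.lchild.count >= 2:
--     result += tree_search(tree.lchild, pref + '0')
--     ok = False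
--   if tree.rchild is not None and tree.rchild.count >= 2:
--     result += tree_search(tree.rchild, pref + '1')
--     ok = False
--   if ok:
--     return result + [pref]
--   return result
--
-- def double_prefix(L):
--   root = Node()
--   for word in L:
--     tree = root
--     for char in word:
--       if char == '0':
--         tree = tree_left(tree)
--       else:
--         tree = tree_right(tree)
--       tree.count += 1
--   return tree_search(root)
-- ===== SOURCE B (Python) =====
-- def _solve(words, pref):
--     zeros = [w[1:] for w in words if w[:1] == '0']
--     ones = [w[1:] for w in words if w and w[0] != '0']
--     if len(zeros) < 2 and len(ones) < 2:
--         return [pref]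
--     res = []
--     if len(zeros) >= 2:
--         res += _solve(zeros, pref + '0')
--     if len(ones) >= 2:
--         res += _solve(ones, pref + '1')
--     return res
--
-- def double_prefix(L):
--     return _solve(list(L), '')
-- ===== Notes on version B (the rewrite author's own statement) =====
-- stated objective: simpler
-- what changed: Replaces A's two-phase mutable counted trie (Node objects built by pointer-walking inserts, then a DFS over the tree) by one short top-down recursion that partitions the list of word suffixes by leading character ('0' vs anything else) and recurses only into partitions of size >= 2; no tree is ever materialized.
import Mathlib
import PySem

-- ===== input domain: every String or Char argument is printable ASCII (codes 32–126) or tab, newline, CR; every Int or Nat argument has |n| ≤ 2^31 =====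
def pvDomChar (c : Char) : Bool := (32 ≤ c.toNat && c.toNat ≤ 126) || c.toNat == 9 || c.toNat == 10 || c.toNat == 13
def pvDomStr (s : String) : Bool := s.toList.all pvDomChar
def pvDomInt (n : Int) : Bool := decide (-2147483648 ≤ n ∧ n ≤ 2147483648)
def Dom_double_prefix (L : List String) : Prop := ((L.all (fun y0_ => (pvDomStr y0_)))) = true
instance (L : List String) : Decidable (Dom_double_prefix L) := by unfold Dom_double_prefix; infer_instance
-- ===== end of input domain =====

-- B replaces A's mutable counted trie (build then DFS) by a single top-down recursion that
-- partitions the word list by leading character; objective: simpler (no tree is materialized).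

-- ===== PORT A =====
inductive PyTrie where
  | nil : PyTrie
  | node : Int → PyTrie → PyTrie → PyTrie
deriving DecidableEq, Repr

-- tree_left / tree_right's "create the child if absent"
def pyTrieOrNew : PyTrie → PyTrie
  | .nil => .node 0 .nil .nil
  | t => t

-- tree.count += 1
def pyTrieBump : PyTrie → PyTrie
  | .nil => .nil
  | .node c l r => .node (c + 1) l r

def pyTrieCount : PyTrie → Int
  | .nil => 0
  | .node c _ _ => c

-- A's inner loop: walk from the current node; for each char create/bump the child and descend
def pyInsert : PyTrie → List Char → PyTrie
  | t, [] => t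
  | .nil, _ :: _ => .nil    -- unreachable: the walk only ever stands on a node
  | .node c l r, ch :: rest =>
      if ch = '0' then .node c (pyInsert (pyTrieBump (pyTrieOrNew l)) rest) r
      else .node c l (pyInsert (pyTrieBump (pyTrieOrNew r)) rest)

-- tree_search; the final if renders the 'ok' flag (true iff neither recursion fired)
def pyTreeSearch : PyTrie → String → List String
  | .nil, pref => [pref]    -- unreachable: only existing nodes are searched
  | .node _ l r, pref =>
      (if l ≠ PyTrie.nil ∧ 2 ≤ pyTrieCount l then pyTreeSearch l (pref ++ "0") else [])
      ++ (if r ≠ PyTrie.nil ∧ 2 ≤ pyTrieCount r then pyTreeSearch r (pref ++ "1") else [])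
      ++ (if (l ≠ PyTrie.nil ∧ 2 ≤ pyTrieCount l) ∨ (r ≠ PyTrie.nil ∧ 2 ≤ pyTrieCount r)
          then [] else [pref])

def double_prefix (L : List String) : List String :=
  pyTreeSearch (L.foldl (fun t w => pyInsert t w.toList) (PyTrie.node 0 .nil .nil)) ""

-- ===== PORT B =====
-- [w[1:] for w in words if w[:1] == '0']
def altZeros (words : List String) : List String :=
  (words.filter (fun w => decide (w.toList.head? = some '0'))).map
    (fun w => String.ofList w.toList.tail)

-- [w[1:] for w in words if w and w[0] != '0']
def altOnes (words : List String) : List String :=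
  (words.filter (fun w => decide (w.toList ≠ [] ∧ w.toList.head? ≠ some '0'))).map
    (fun w => String.ofList w.toList.tail)

-- termination measure fact for the recursion below: taking tails of a (nonempty-word) sublist
-- strictly shrinks the total number of characters once the sublist has ≥ 1 element
theorem sum_tails_le {α : Type} (len : α → Nat) (tl : α → α) (q : α → Bool)
    (hq : ∀ w, q w = true → len (tl w) + 1 = len w) (xs : List α) :
    (((xs.filter q).map tl).map len).sum + (xs.filter q).length ≤ (xs.map len).sum := by
  induction xs with
  | nil => simp
  | cons w xs ih =>
      by_cases h : q w = true
      · have := hq w h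
        simp [h, List.map_map, Function.comp_def] at *
        omega
      · simp at h
        simp [h, List.map_map, Function.comp_def] at *
        omega

theorem altZeros_measure (words : List String) :
    ((altZeros words).map (fun w => w.toList.length)).sum + (words.filter (fun w => decide (w.toList.head? = some '0'))).length
      ≤ (words.map (fun w => w.toList.length)).sum := by
  have := sum_tails_le (fun w => w.toList.length) (fun w => String.ofList w.toList.tail)
    (fun w => decide (w.toList.head? = some '0'))
    (by intro w hw
        simp at hw
        cases hcs : w.toList with
        | nil => rw [hcs] at hw; simp at hw
        | cons c cs => simp [hcs])
    words
  simpa [altZeros, List.map_map] using this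

theorem altOnes_measure (words : List String) :
    ((altOnes words).map (fun w => w.toList.length)).sum + (words.filter (fun w => decide (w.toList ≠ [] ∧ w.toList.head? ≠ some '0'))).length
      ≤ (words.map (fun w => w.toList.length)).sum := by
  have := sum_tails_le (fun w => w.toList.length) (fun w => String.ofList w.toList.tail)
    (fun w => decide (w.toList ≠ [] ∧ w.toList.head? ≠ some '0'))
    (by intro w hw
        simp at hw
        cases hcs : w.toList with
        | nil => exact absurd (String.toList_eq_nil_iff.mp hcs) hw.1
        | cons c cs => simp [hcs])
    words
  simpa [altOnes, List.map_map] using this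

theorem altZeros_length_le (words : List String) :
    (altZeros words).length = (words.filter (fun w => decide (w.toList.head? = some '0'))).length := by
  simp [altZeros]

theorem altOnes_length_le (words : List String) :
    (altOnes words).length = (words.filter (fun w => decide (w.toList ≠ [] ∧ w.toList.head? ≠ some '0'))).length := by
  simp [altOnes]

def altSolve (words : List String) (pref : String) : List String :=
  let zeros := altZeros words
  let ones := altOnes words
  if zeros.length < 2 ∧ ones.length < 2 then [pref]
  else
    (if h0 : 2 ≤ zeros.length then altSolve zeros (pref ++ "0") else [])
    ++ (if h1 : 2 ≤ ones.length then altSolve ones (pref ++ "1") else [])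
termination_by (words.map (fun w => w.toList.length)).sum
decreasing_by
  · have h1 := altZeros_measure words
    have h2 := altZeros_length_le words
    simp only [zeros, ones] at *
    omega
  · have h1 := altOnes_measure words
    have h2 := altOnes_length_le words
    simp only [zeros, ones] at *
    omega

def double_prefix_alt (L : List String) : List String := altSolve L ""

-- ===== PRECONDITION & SPEC =====
def Spec_double_prefix (L : List String) (out : List String) : Prop := out = double_prefix_alt L
instance (L : List String) (out : List String) : Decidable (Spec_double_prefix L out) := by unfold Spec_double_prefix; infer_instance

-- ===== CLAIM (what is proved, stated in full; the proofs are below) =====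
def Claim_equal_double_prefix : Prop := ∀ (L : List String), Dom_double_prefix L → Spec_double_prefix L (double_prefix L)

-- ===== LEMMAS AND PROOFS =====

-- tails of the words starting with '0' (resp. any other character), at the char-list level
def tl0 (xs : List (List Char)) : List (List Char) :=
  (xs.filter (fun w => decide (w.head? = some '0'))).map List.tail

def tl1 (xs : List (List Char)) : List (List Char) :=
  (xs.filter (fun w => decide (w ≠ [] ∧ w.head? ≠ some '0'))).map List.tail

theorem tl0_measure (xs : List (List Char)) :
    ((tl0 xs).map List.length).sum + (xs.filter (fun w => decide (w.head? = some '0'))).length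
      ≤ (xs.map List.length).sum := by
  have := sum_tails_le List.length List.tail (fun w => decide (w.head? = some '0'))
    (by intro w hw; simp at hw; cases w with
        | nil => simp at hw
        | cons c cs => simp) xs
  simpa [tl0] using this

theorem tl1_measure (xs : List (List Char)) :
    ((tl1 xs).map List.length).sum + (xs.filter (fun w => decide (w ≠ [] ∧ w.head? ≠ some '0'))).length
      ≤ (xs.map List.length).sum := by
  have := sum_tails_le List.length List.tail (fun w => decide (w ≠ [] ∧ w.head? ≠ some '0'))
    (by intro w hw; simp at hw; cases w with
        | nil => exact absurd rfl hw.1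
        | cons c cs => simp) xs
  simpa [tl1] using this

-- the value of the trie node reached by a set of suffixes: count = how many, children = tails
def childTrie (xs : List (List Char)) : PyTrie :=
  if h : xs = [] then .nil
  else .node (xs.length : Int) (childTrie (tl0 xs)) (childTrie (tl1 xs))
termination_by (xs.map List.length).sum + xs.length
decreasing_by
  · have h1 := tl0_measure xs
    have : (tl0 xs).length ≤ (xs.filter (fun w => decide (w.head? = some '0'))).length := by
      simp [tl0]
    have hx : 0 < xs.length := List.length_pos_iff.mpr h
    omega
  · have h1 := tl1_measure xs
    have : (tl1 xs).length ≤ (xs.filter (fun w => decide (w ≠ [] ∧ w.head? ≠ some '0'))).length := by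
      simp [tl1]
    have hx : 0 < xs.length := List.length_pos_iff.mpr h
    omega

theorem childTrie_nil : childTrie [] = PyTrie.nil := by rw [childTrie]; rfl

theorem childTrie_cons (xs : List (List Char)) (h : xs ≠ []) :
    childTrie xs = .node (xs.length : Int) (childTrie (tl0 xs)) (childTrie (tl1 xs)) := by
  rw [childTrie]; simp [h]

theorem bump_orNew_childTrie (xs : List (List Char)) :
    pyTrieBump (pyTrieOrNew (childTrie xs)) =
      .node ((xs.length : Int) + 1) (childTrie (tl0 xs)) (childTrie (tl1 xs)) := by
  by_cases h : xs = []
  · subst h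
    simp [childTrie_nil, pyTrieOrNew, pyTrieBump, tl0, tl1, childTrie_nil]
  · rw [childTrie_cons xs h]
    simp [pyTrieOrNew, pyTrieBump]

-- inserting one more word into a child subtree appends its suffix to the partition
theorem insert_childTrie (cs : List Char) : ∀ (xs : List (List Char)),
    pyInsert (pyTrieBump (pyTrieOrNew (childTrie xs))) cs = childTrie (xs ++ [cs]) := by
  induction cs with
  | nil =>
      intro xs
      rw [bump_orNew_childTrie, childTrie_cons (xs ++ [[]]) (by simp)]
      simp [pyInsert, tl0, tl1]
  | cons c rest ih =>
      intro xs
      rw [bump_orNew_childTrie, childTrie_cons (xs ++ [c :: rest]) (by simp)]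
      by_cases hc : c = '0'
      · subst hc
        simp [pyInsert, tl0, tl1, ih]
      · simp [pyInsert, hc, tl0, tl1, ih]

-- building the whole trie = root with the two partitioned child subtries
theorem build_childTrie : ∀ (ws : List String) (a b : List (List Char)),
    ws.foldl (fun t w => pyInsert t w.toList) (PyTrie.node 0 (childTrie a) (childTrie b)) =
      PyTrie.node 0 (childTrie (a ++ tl0 (ws.map String.toList)))
                    (childTrie (b ++ tl1 (ws.map String.toList))) := by
  intro ws
  induction ws with
  | nil => intro a b; simp [tl0, tl1]
  | cons w ws ih =>
      intro a b
      rw [List.foldl_cons]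
      cases hw : w.toList with
      | nil =>
          rw [show pyInsert (PyTrie.node 0 (childTrie a) (childTrie b)) [] =
                PyTrie.node 0 (childTrie a) (childTrie b) from rfl]
          rw [ih a b]
          have h0 : tl0 (List.map String.toList (w :: ws)) = tl0 (List.map String.toList ws) := by
            simp [tl0, hw]
          have h1 : tl1 (List.map String.toList (w :: ws)) = tl1 (List.map String.toList ws) := by
            simp [tl1, hw]
          rw [h0, h1]
      | cons c rest =>
          by_cases hc : c = '0'
          · subst hc
            rw [show pyInsert (PyTrie.node 0 (childTrie a) (childTrie b)) ('0' :: rest) =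
                  PyTrie.node 0 (pyInsert (pyTrieBump (pyTrieOrNew (childTrie a))) rest) (childTrie b) from by
              rw [pyInsert, if_pos rfl]]
            rw [insert_childTrie rest a, ih (a ++ [rest]) b]
            have h0 : tl0 (List.map String.toList (w :: ws)) = rest :: tl0 (List.map String.toList ws) := by
              simp [tl0, hw]
            have h1 : tl1 (List.map String.toList (w :: ws)) = tl1 (List.map String.toList ws) := by
              simp [tl1, hw]
            rw [h0, h1]
            simp [List.append_assoc]
          · rw [show pyInsert (PyTrie.node 0 (childTrie a) (childTrie b)) (c :: rest) =
                  PyTrie.node 0 (childTrie a) (pyInsert (pyTrieBump (pyTrieOrNew (childTrie b))) rest) from by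
              rw [pyInsert, if_neg hc]]
            rw [insert_childTrie rest b, ih a (b ++ [rest])]
            have h0 : tl0 (List.map String.toList (w :: ws)) = tl0 (List.map String.toList ws) := by
              simp [tl0, hw, hc]
            have h1 : tl1 (List.map String.toList (w :: ws)) = rest :: tl1 (List.map String.toList ws) := by
              simp [tl1, hw, hc]
            rw [h0, h1]
            simp [List.append_assoc]

-- bridge: the char-list partitions are the string partitions of port B
theorem tl0_map (ws : List String) :
    tl0 (ws.map String.toList) = (altZeros ws).map String.toList := by
  simp [tl0, altZeros, List.filter_map, List.map_map, Function.comp_def]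

theorem tl1_map (ws : List String) :
    tl1 (ws.map String.toList) = (altOnes ws).map String.toList := by
  simp [tl1, altOnes, List.filter_map, List.map_map, Function.comp_def]

-- A's DFS guard at a child holds exactly when that partition has ≥ 2 suffixes
theorem guard_iff (xs : List (List Char)) :
    ((childTrie xs ≠ PyTrie.nil ∧ 2 ≤ pyTrieCount (childTrie xs))) ↔ 2 ≤ xs.length := by
  by_cases h : xs = []
  · subst h; simp [childTrie_nil]
  · rw [childTrie_cons xs h]
    simp [pyTrieCount]

-- non-let unfolding equation for altSolve
theorem altSolve_eq (words : List String) (pref : String) : altSolve words pref =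
    if (altZeros words).length < 2 ∧ (altOnes words).length < 2 then [pref]
    else
      (if _h0 : 2 ≤ (altZeros words).length then altSolve (altZeros words) (pref ++ "0") else [])
      ++ (if _h1 : 2 ≤ (altOnes words).length then altSolve (altOnes words) (pref ++ "1") else []) := by
  rw [altSolve]

-- the DFS over the canonical trie is exactly port B's recursion
theorem search_eq_altSolve : ∀ (ws : List String) (pref : String) (c : Int),
    pyTreeSearch (PyTrie.node c (childTrie (tl0 (ws.map String.toList)))
                                (childTrie (tl1 (ws.map String.toList)))) pref
      = altSolve ws pref := by
  intro ws pref
  induction ws, pref using altSolve.induct with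
  | case1 ws pref zeros ones h =>
      intro c
      replace h : (altZeros ws).length < 2 ∧ (altOnes ws).length < 2 := h
      have e0 : (tl0 (List.map String.toList ws)).length = (altZeros ws).length := by
        rw [tl0_map]; simp
      have e1 : (tl1 (List.map String.toList ws)).length = (altOnes ws).length := by
        rw [tl1_map]; simp
      have h0 : ¬ (2 ≤ (altZeros ws).length) := by omega
      have h1 : ¬ (2 ≤ (altOnes ws).length) := by omega
      rw [altSolve_eq, if_pos h]
      simp only [pyTreeSearch, guard_iff, e0, e1]
      simp [h0, h1]
  | case2 ws pref zeros ones h ih0 ih1 =>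
      intro c
      replace h : ¬ ((altZeros ws).length < 2 ∧ (altOnes ws).length < 2) := h
      replace ih0 : 2 ≤ (altZeros ws).length → ∀ (c : Int),
          pyTreeSearch (PyTrie.node c (childTrie (tl0 ((altZeros ws).map String.toList)))
                                      (childTrie (tl1 ((altZeros ws).map String.toList)))) (pref ++ "0")
            = altSolve (altZeros ws) (pref ++ "0") := ih0
      replace ih1 : 2 ≤ (altOnes ws).length → ∀ (c : Int),
          pyTreeSearch (PyTrie.node c (childTrie (tl0 ((altOnes ws).map String.toList)))
                                      (childTrie (tl1 ((altOnes ws).map String.toList)))) (pref ++ "1")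
            = altSolve (altOnes ws) (pref ++ "1") := ih1
      have e0 : (tl0 (List.map String.toList ws)).length = (altZeros ws).length := by
        rw [tl0_map]; simp
      have e1 : (tl1 (List.map String.toList ws)).length = (altOnes ws).length := by
        rw [tl1_map]; simp
      rw [altSolve_eq, if_neg h]
      simp only [pyTreeSearch, guard_iff, e0, e1]
      have L0 : (if (2:Nat) ≤ (altZeros ws).length
                  then pyTreeSearch (childTrie (tl0 (List.map String.toList ws))) (pref ++ "0") else [])
              = (if _h : 2 ≤ (altZeros ws).length then altSolve (altZeros ws) (pref ++ "0") else []) := by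
        by_cases h0 : 2 ≤ (altZeros ws).length
        · rw [if_pos h0]
          rw [dif_pos h0]
          rw [tl0_map]
          have hne : (altZeros ws).map String.toList ≠ [] := by
            simp only [ne_eq, List.map_eq_nil_iff]
            intro hc
            rw [hc] at h0
            simp at h0
          rw [childTrie_cons _ hne]
          exact ih0 h0 _
        · rw [if_neg h0, dif_neg h0]
      have L1 : (if (2:Nat) ≤ (altOnes ws).length
                  then pyTreeSearch (childTrie (tl1 (List.map String.toList ws))) (pref ++ "1") else [])
              = (if _h : 2 ≤ (altOnes ws).length then altSolve (altOnes ws) (pref ++ "1") else []) := by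
        by_cases h1 : 2 ≤ (altOnes ws).length
        · rw [if_pos h1]
          rw [dif_pos h1]
          rw [tl1_map]
          have hne : (altOnes ws).map String.toList ≠ [] := by
            simp only [ne_eq, List.map_eq_nil_iff]
            intro hc
            rw [hc] at h1
            simp at h1
          rw [childTrie_cons _ hne]
          exact ih1 h1 _
        · rw [if_neg h1, dif_neg h1]
      rw [L0, L1, if_pos (by omega)]
      simp

-- ===== VERDICT (by name: the statement is the Claim_ definition above) =====
theorem double_prefix_spec : Claim_equal_double_prefix := by
  intro L _
  unfold Spec_double_prefix double_prefix double_prefix_alt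
  have h0 : (PyTrie.node 0 PyTrie.nil PyTrie.nil) = PyTrie.node 0 (childTrie []) (childTrie []) := by
    rw [childTrie_nil]
  rw [h0, build_childTrie L [] []]
  simpa using search_eq_altSolve L "" 0
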